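-- pv_equiv track=rewrite | github.com/gongc123/CFT-fixed-point-tensor- | method.py | slset
-- ===== SOURCE A (Python) =====
-- def slset(lis1,lis2):            # return the set of strings  {k''} lies between lis1 and lis2
--     if lis1=='':
--         return ['']
--     ns=[]
--     s=slset(lis1[1:],lis2[1:])
--     for n in range(int(lis2[0]),int(lis1[0])+1):
--         for ele in s:
--             ns.append(str(n)+ele)
--     return ns
-- ===== SOURCE B (Python) =====
-- def slset(lis1, lis2):
--     # left-to-right iterative prefix building (A recurses right-to-left on suffixes)
--     outs = ['']
--     for c1, c2 in zip(lis1, lis2):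
--         outs = [pre + str(n) for pre in outs for n in range(int(c2), int(c1) + 1)]
--     return outs
-- ===== Notes on version B (the rewrite author's own statement) =====
-- stated objective: simpler
-- what changed: Replaces the suffix recursion with a single iterative left-to-right pass that extends a list of prefixes per position via a flat comprehension.
import Mathlib
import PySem

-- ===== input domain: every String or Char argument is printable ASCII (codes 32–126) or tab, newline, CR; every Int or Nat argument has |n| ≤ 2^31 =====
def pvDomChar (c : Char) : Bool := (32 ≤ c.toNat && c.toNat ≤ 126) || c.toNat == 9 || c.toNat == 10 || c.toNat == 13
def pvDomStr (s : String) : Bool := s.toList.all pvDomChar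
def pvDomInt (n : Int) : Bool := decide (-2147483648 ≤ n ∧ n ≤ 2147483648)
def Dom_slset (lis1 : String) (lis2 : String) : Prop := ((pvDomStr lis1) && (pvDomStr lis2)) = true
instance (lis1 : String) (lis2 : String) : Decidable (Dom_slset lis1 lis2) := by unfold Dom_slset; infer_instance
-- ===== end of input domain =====

-- B replaces A's right-to-left suffix recursion by a single iterative left-to-right prefix-building pass (simpler decomposition; same output order).


-- ===== PORT A =====
-- int(<one-character string>) — exact for digit characters; Pre_slset restricts to digits (shared by both ports)
def pvDig (c : Char) : Int := (c.toNat : Int) - 48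

-- literal transliteration of A: recursion on the string, double append loop
def slsetA : List Char → List Char → List String
  | [], _ => [""]
  | c1 :: r1, l2 =>
    let s := slsetA r1 l2.tail          -- slset(lis1[1:], lis2[1:])
    match l2 with
    | [] => []                          -- int(lis2[0]) raises IndexError; outside Pre_slset
    | c2 :: _ =>
      (PySem.List.pyRange (pvDig c2) (pvDig c1 + 1) 1).foldl
        (fun ns n => s.foldl (fun ns ele => ns ++ [PySem.Int.toStr n ++ ele]) ns) []

def slset (lis1 : String) (lis2 : String) : List String := slsetA lis1.toList lis2.toList

-- ===== PORT B =====
-- one step of Source B's comprehension: extend every prefix by every digit in range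
def pvStep (outs : List String) (c1 : Char) (c2 : Char) : List String :=
  outs.flatMap (fun pre =>
    (PySem.List.pyRange (pvDig c2) (pvDig c1 + 1) 1).map (fun n => pre ++ PySem.Int.toStr n))

def slset_alt (lis1 : String) (lis2 : String) : List String :=
  (lis1.toList.zip lis2.toList).foldl (fun outs p => pvStep outs p.1 p.2) [""]

-- ===== PRECONDITION & SPEC =====
-- Pre_ excludes inputs where A raises: lis2 shorter than lis1 (IndexError) or a
-- non-digit among the chars int() is applied to (ValueError).
def Pre_slset (lis1 : String) (lis2 : String) : Prop :=
  lis1.toList.length ≤ lis2.toList.length ∧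
  lis1.toList.all Char.isDigit = true ∧
  (lis2.toList.take lis1.toList.length).all Char.isDigit = true
instance (lis1 : String) (lis2 : String) : Decidable (Pre_slset lis1 lis2) := by
  unfold Pre_slset; infer_instance
def pvWitness_slset : String × String := ("21", "10")
def Spec_slset (lis1 : String) (lis2 : String) (out : List String) : Prop := out = slset_alt lis1 lis2
instance (lis1 : String) (lis2 : String) (out : List String) : Decidable (Spec_slset lis1 lis2 out) := by unfold Spec_slset; infer_instance

-- ===== CLAIM (what is proved, stated in full; the proofs are below) =====
def Claim_equal_slset : Prop := ∀ (lis1 : String) (lis2 : String), Dom_slset lis1 lis2 → Pre_slset lis1 lis2 → Spec_slset lis1 lis2 (slset lis1 lis2)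

-- ===== LEMMAS AND PROOFS =====

-- A's cons case as a flatMap
theorem slsetA_cons (c1 c2 : Char) (r1 r2 : List Char) :
    slsetA (c1 :: r1) (c2 :: r2) =
      (PySem.List.pyRange (pvDig c2) (pvDig c1 + 1) 1).flatMap
        (fun n => (slsetA r1 r2).map (fun ele => PySem.Int.toStr n ++ ele)) := by
  show (PySem.List.pyRange (pvDig c2) (pvDig c1 + 1) 1).foldl
        (fun ns n => (slsetA r1 r2).foldl (fun ns ele => ns ++ [PySem.Int.toStr n ++ ele]) ns) [] = _
  simp only [PySem.List.foldl_append_singleton_eq_map]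
  rw [PySem.List.foldl_append_eq_flatMap]
  simp

-- B's fold distributes over the accumulator as a flatMap of A's value
theorem foldl_step_eq (l1 : List Char) :
    ∀ (l2 : List Char) (acc : List String), l1.length ≤ l2.length →
      (l1.zip l2).foldl (fun outs p => pvStep outs p.1 p.2) acc =
        acc.flatMap (fun pre => (slsetA l1 l2).map (fun suf => pre ++ suf)) := by
  induction l1 with
  | nil =>
    intro l2 acc _
    simp [slsetA]
  | cons c1 r1 ih =>
    intro l2 acc hlen
    match l2 with
    | [] => simp at hlen
    | c2 :: r2 =>
      simp only [List.zip_cons_cons, List.foldl_cons]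
      rw [ih r2 _ (by simpa using hlen)]
      rw [slsetA_cons]
      simp [pvStep, List.flatMap_assoc, List.map_flatMap, List.flatMap_map,
            Function.comp_def, String.append_assoc]

-- ===== VERDICT (by name: the statement is the Claim_ definition above) =====
theorem slset_spec : Claim_equal_slset := by
  intro lis1 lis2 _ hpre
  unfold Spec_slset slset slset_alt
  rw [foldl_step_eq _ _ _ hpre.1]
  simp
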